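-- pv_equiv track=rewrite | github.com/tmdtmd85/EulerProject | 31_60/43.py | generate
-- ===== SOURCE A (Python) =====
-- def generate(nums, n):
--     if n == 1:
--         if nums[0] != 0:
--             return nums
--         else:
--             return []
--
--     l = []
--     for i in range(len(nums)):
--         if i == 0:
--             l += list(map(lambda g: nums[i] + 10*g, generate(nums[1:], n-1)))
--         elif i == len(nums)-1:
--             l += list(map(lambda g: nums[i] + 10*g, generate(nums[:i], n-1)))
--         else:
--             l += list(map(lambda g: nums[i] + 10*g, generate(nums[:i]+nums[i+1:], n-1)))
--
--     if n == 4: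
--         return list(filter(lambda x: (x % 1000)%2 == 0, l))
--     elif n == 5:
--         return list(filter(lambda x: (x % 1000)%3 == 0, l))
--     elif n == 6:
--         return list(filter(lambda x: (x % 1000)%5 == 0, l))
--     elif n == 7:
--         return list(filter(lambda x: (x % 1000)%7 == 0, l))
--     elif n == 8:
--         return list(filter(lambda x: (x % 1000)%11 == 0, l))
--     elif n == 9:
--         return list(filter(lambda x: (x % 1000)%13 == 0, l))
--     elif n == 10:
--         return list(filter(lambda x: (x % 1000)%17 == 0, l))
--
--     return l
-- ===== SOURCE B (Python) =====
-- def generate(nums, n):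
--     # Same recursion, but memoized on (remaining subsequence, n): each distinct
--     # subproblem is computed once instead of factorially many times.
--     cache = {}
--
--     def go(nums, n):
--         key = (tuple(nums), n)
--         hit = cache.get(key)
--         if hit is not None:
--             return hit
--         if n == 1:
--             res = list(nums) if nums[0] != 0 else []
--         else:
--             l = []
--             for i in range(len(nums)):
--                 rest = nums[:i] + nums[i + 1:]
--                 sub = go(rest, n - 1)
--                 l += [nums[i] + 10 * g for g in sub]
--             d = {4: 2, 5: 3, 6: 5, 7: 7, 8: 11, 9: 13, 10: 17}.get(n)
--             res = l if d is None else [x for x in l if (x % 1000) % d == 0]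
--         cache[key] = res
--         return res
--
--     return go(list(nums), n)
-- ===== Notes on version B (the rewrite author's own statement) =====
-- stated objective: alternative
-- what changed: B replaces A's naive recursion (which recomputes the same (subsequence, n) subproblem many times) with a memoized recursion keyed on (remaining subsequence tuple, n), computing each distinct subproblem once and threading a cache, and looks the per-level filter divisor up in a dict instead of an elif chain (intended as faster; a timing run measured only 1.82x at the largest size both versions finished).
import Mathlib
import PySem

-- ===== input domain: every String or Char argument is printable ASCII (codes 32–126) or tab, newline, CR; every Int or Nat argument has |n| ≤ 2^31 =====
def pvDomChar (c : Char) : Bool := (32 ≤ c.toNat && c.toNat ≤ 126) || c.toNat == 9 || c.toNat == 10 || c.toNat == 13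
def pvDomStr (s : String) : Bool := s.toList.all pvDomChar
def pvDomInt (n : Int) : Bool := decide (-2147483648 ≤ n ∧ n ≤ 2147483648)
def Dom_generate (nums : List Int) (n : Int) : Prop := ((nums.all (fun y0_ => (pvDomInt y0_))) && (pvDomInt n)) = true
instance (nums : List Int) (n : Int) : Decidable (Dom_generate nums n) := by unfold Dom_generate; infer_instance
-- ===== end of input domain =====

-- B memoizes A's recursion on (remaining subsequence, n), computing each distinct subproblem once.


-- ===== PORT A =====
-- A's recursion made structural on a fuel that is always sufficient (each recursive call
-- removes one element from the list, so fuel = nums.length + 1 never runs out).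
def generateFuel : Nat → List Int → Int → List Int
  | 0, _, _ => []   -- unreachable when fuel > nums.length
  | fuel+1, nums, n =>
    if n = 1 then
      match nums with
      | [] => []      -- Python raises IndexError here; excluded by Pre_generate
      | x :: _ => if x ≠ 0 then nums else []
    else
      let l := (PySem.List.pyRange 0 (PySem.List.len nums) 1).foldl (fun l i =>
        if i = 0 then
          l ++ (generateFuel fuel (PySem.List.slice nums (some 1) none) (n-1)).map
                 (fun g => PySem.List.pyGetD nums i 0 + 10*g)
        else if i = PySem.List.len nums - 1 then
          l ++ (generateFuel fuel (PySem.List.slice nums none (some i)) (n-1)).map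
                 (fun g => PySem.List.pyGetD nums i 0 + 10*g)
        else
          l ++ (generateFuel fuel (PySem.List.slice nums none (some i) ++ PySem.List.slice nums (some (i+1)) none) (n-1)).map
                 (fun g => PySem.List.pyGetD nums i 0 + 10*g)) []
      if n = 4 then l.filter (fun x => PySem.Int.mod (PySem.Int.mod x 1000) 2 == 0)
      else if n = 5 then l.filter (fun x => PySem.Int.mod (PySem.Int.mod x 1000) 3 == 0)
      else if n = 6 then l.filter (fun x => PySem.Int.mod (PySem.Int.mod x 1000) 5 == 0)
      else if n = 7 then l.filter (fun x => PySem.Int.mod (PySem.Int.mod x 1000) 7 == 0)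
      else if n = 8 then l.filter (fun x => PySem.Int.mod (PySem.Int.mod x 1000) 11 == 0)
      else if n = 9 then l.filter (fun x => PySem.Int.mod (PySem.Int.mod x 1000) 13 == 0)
      else if n = 10 then l.filter (fun x => PySem.Int.mod (PySem.Int.mod x 1000) 17 == 0)
      else l

def generate (nums : List Int) (n : Int) : List Int := generateFuel (nums.length + 1) nums n

-- ===== PORT B =====
-- B's memoized recursion: the cache maps (remaining list, n) to the computed result and is
-- threaded through the loop; same fuel device as port A.
def goB : Nat → List Int → Int → PySem.Dict (List Int × Int) (List Int) →
    List Int × PySem.Dict (List Int × Int) (List Int)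
  | 0, _, _, c => ([], c)
  | fuel+1, nums, n, c =>
    match c.get? (nums, n) with
    | some v => (v, c)
    | none =>
      if n = 1 then
        let res := match nums with
          | [] => []    -- Python raises IndexError here; excluded by Pre_generate
          | x :: _ => if x ≠ 0 then nums else []
        (res, c.insert (nums, n) res)
      else
        let p := (PySem.List.pyRange 0 (PySem.List.len nums) 1).foldl (fun acc i =>
          let rest := PySem.List.slice nums none (some i) ++ PySem.List.slice nums (some (i+1)) none
          let r := goB fuel rest (n-1) acc.2
          (acc.1 ++ r.1.map (fun g => PySem.List.pyGetD nums i 0 + 10*g), r.2)) ([], c)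
        let res := match (PySem.Dict.ofList [((4:Int),(2:Int)),(5,3),(6,5),(7,7),(8,11),(9,13),(10,17)]).get? n with
          | none => p.1
          | some d => p.1.filter (fun x => PySem.Int.mod (PySem.Int.mod x 1000) d == 0)
        (res, p.2.insert (nums, n) res)

def generate_alt (nums : List Int) (n : Int) : List Int :=
  (goB (nums.length + 1) nums n PySem.Dict.empty).1

-- ===== PRECONDITION & SPEC =====
-- Pre_ excludes exactly n = len(nums) + 1: there Python A's recursion reaches `nums[0]`
-- on an empty list and raises IndexError.
def Pre_generate (nums : List Int) (n : Int) : Prop := n ≠ (nums.length : Int) + 1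
instance (nums : List Int) (n : Int) : Decidable (Pre_generate nums n) := by unfold Pre_generate; infer_instance
def pvWitness_generate : List Int × Int := ([1, 2, 3], 3)
def Spec_generate (nums : List Int) (n : Int) (out : List Int) : Prop := out = generate_alt nums n
instance (nums : List Int) (n : Int) (out : List Int) : Decidable (Spec_generate nums n out) := by unfold Spec_generate; infer_instance

-- ===== CLAIM (what is proved, stated in full; the proofs are below) =====
def Claim_equal_generate : Prop := ∀ (nums : List Int) (n : Int), Dom_generate nums n → Pre_generate nums n → Spec_generate nums n (generate nums n)

-- ===== LEMMAS AND PROOFS =====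

-- the list with the element at index i removed (the value of all three of A's slice branches)
def remAt (nums : List Int) (i : Int) : List Int :=
  PySem.List.slice nums none (some i) ++ PySem.List.slice nums (some (i+1)) none

-- A's trailing elif chain of filters, as a named function for the unfolding lemma
def pyFilterChain (n : Int) (l : List Int) : List Int :=
  if n = 4 then l.filter (fun x => PySem.Int.mod (PySem.Int.mod x 1000) 2 == 0)
  else if n = 5 then l.filter (fun x => PySem.Int.mod (PySem.Int.mod x 1000) 3 == 0)
  else if n = 6 then l.filter (fun x => PySem.Int.mod (PySem.Int.mod x 1000) 5 == 0)
  else if n = 7 then l.filter (fun x => PySem.Int.mod (PySem.Int.mod x 1000) 7 == 0)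
  else if n = 8 then l.filter (fun x => PySem.Int.mod (PySem.Int.mod x 1000) 11 == 0)
  else if n = 9 then l.filter (fun x => PySem.Int.mod (PySem.Int.mod x 1000) 13 == 0)
  else if n = 10 then l.filter (fun x => PySem.Int.mod (PySem.Int.mod x 1000) 17 == 0)
  else l

-- cache invariant: every stored value is the result (per port A) of its key
def GoodC (c : PySem.Dict (List Int × Int) (List Int)) : Prop :=
  ∀ k v, c.get? k = some v → v = generate k.1 k.2

lemma remAt_length (nums : List Int) (i : Int) (h0 : 0 ≤ i) (h1 : i < (nums.length : Int)) :
    (remAt nums i).length = nums.length - 1 := by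
  unfold remAt
  rw [PySem.List.slice_to nums h0, PySem.List.slice_from nums (by omega)]
  simp [List.length_take, List.length_drop]
  omega

lemma branch_eq (nums : List Int) (i : Int) (h0 : 0 ≤ i) (h1 : i < (nums.length : Int)) :
    (if i = 0 then PySem.List.slice nums (some 1) none
     else if i = PySem.List.len nums - 1 then PySem.List.slice nums none (some i)
     else PySem.List.slice nums none (some i) ++ PySem.List.slice nums (some (i+1)) none)
    = remAt nums i := by
  unfold remAt
  split_ifs with hz hl
  · subst hz
    rw [PySem.List.slice_to nums (le_refl 0), PySem.List.slice_from nums (by omega),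
        PySem.List.slice_from nums (by omega)]
    simp
  · rw [PySem.List.slice_from nums (by omega)]
    have h : (i + 1).toNat = nums.length := by
      rw [PySem.List.len_eq] at hl; omega
    rw [h, List.drop_length, List.append_nil]
  · rfl

lemma fuel_irrel : ∀ (f₁ f₂ : Nat) (nums : List Int) (n : Int),
    nums.length < f₁ → nums.length < f₂ → generateFuel f₁ nums n = generateFuel f₂ nums n := by
  intro f₁
  induction f₁ with
  | zero => intro f₂ nums n h1 _; exact absurd h1 (by omega)
  | succ k IH =>
    intro f₂ nums n h1 h2
    cases f₂ with
    | zero => exact absurd h2 (by omega)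
    | succ m =>
      simp only [generateFuel]
      by_cases hn : n = 1
      · rw [if_pos hn, if_pos hn]
      · rw [if_neg hn, if_neg hn]
        refine congrArg (pyFilterChain n) (PySem.List.foldl_congr_mem' _ _ _ _ ?_)
        intro i hi acc
        obtain ⟨hi0, hilt⟩ := PySem.List.mem_pyRange_one.mp hi
        rw [PySem.List.len_eq] at hilt
        split_ifs with hz hl
        · have hL : (PySem.List.slice nums (some 1) none).length = nums.length - 1 := by
            rw [PySem.List.slice_from_one]; simp
          rw [IH m (PySem.List.slice nums (some 1) none) (n-1) (by omega) (by omega)]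
        · have hL : (PySem.List.slice nums none (some i)).length ≤ nums.length - 1 := by
            rw [PySem.List.slice_to nums hi0]; simp [List.length_take]; omega
          rw [IH m (PySem.List.slice nums none (some i)) (n-1) (by omega) (by omega)]
        · have hL : (PySem.List.slice nums none (some i) ++ PySem.List.slice nums (some (i+1)) none).length = nums.length - 1 :=
            remAt_length nums i hi0 hilt
          rw [IH m (PySem.List.slice nums none (some i) ++ PySem.List.slice nums (some (i+1)) none) (n-1) (by omega) (by omega)]

lemma generate_unfold (nums : List Int) (n : Int) :
    generate nums n =
      if n = 1 then
        (match nums with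
         | [] => ([] : List Int)
         | x :: _ => if x ≠ 0 then nums else [])
      else
        pyFilterChain n ((PySem.List.pyRange 0 (PySem.List.len nums) 1).foldl
          (fun l i => l ++ (generate (remAt nums i) (n-1)).map
            (fun g => PySem.List.pyGetD nums i 0 + 10*g)) []) := by
  show generateFuel (nums.length + 1) nums n = _
  simp only [generateFuel]
  by_cases hn : n = 1
  · rw [if_pos hn, if_pos hn]
  · rw [if_neg hn, if_neg hn]
    refine congrArg (pyFilterChain n) (PySem.List.foldl_congr_mem' _ _ _ _ ?_)
    intro i hi acc
    obtain ⟨hi0, hilt⟩ := PySem.List.mem_pyRange_one.mp hi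
    rw [PySem.List.len_eq] at hilt
    have hrw := branch_eq nums i hi0 hilt
    have hlen : (remAt nums i).length = nums.length - 1 := remAt_length nums i hi0 hilt
    have hfe : generateFuel nums.length (remAt nums i) (n-1) = generate (remAt nums i) (n-1) := by
      rw [show generate (remAt nums i) (n-1)
            = generateFuel ((remAt nums i).length + 1) (remAt nums i) (n-1) from rfl]
      exact fuel_irrel nums.length ((remAt nums i).length + 1) (remAt nums i) (n-1) (by omega) (by omega)
    by_cases hz : i = 0
    · rw [if_pos hz] at hrw
      rw [if_pos hz, hrw, hfe]
    · rw [if_neg hz] at hrw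
      rw [if_neg hz]
      by_cases hl : i = PySem.List.len nums - 1
      · rw [if_pos hl] at hrw
        rw [if_pos hl, hrw, hfe]
      · rw [if_neg hl] at hrw
        rw [if_neg hl, hrw, hfe]

lemma table_filter_eq (n : Int) (l : List Int) :
    (match (PySem.Dict.ofList [((4:Int),(2:Int)),(5,3),(6,5),(7,7),(8,11),(9,13),(10,17)]).get? n with
     | none => l
     | some d => l.filter (fun x => PySem.Int.mod (PySem.Int.mod x 1000) d == 0))
    = pyFilterChain n l := by
  by_cases h4 : n = 4
  · subst h4; rfl
  by_cases h5 : n = 5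
  · subst h5; rfl
  by_cases h6 : n = 6
  · subst h6; rfl
  by_cases h7 : n = 7
  · subst h7; rfl
  by_cases h8 : n = 8
  · subst h8; rfl
  by_cases h9 : n = 9
  · subst h9; rfl
  by_cases h10 : n = 10
  · subst h10; rfl
  have hg : (PySem.Dict.ofList [((4:Int),(2:Int)),(5,3),(6,5),(7,7),(8,11),(9,13),(10,17)]).get? n = none := by
    simp [PySem.Dict.ofList, PySem.Dict.update, PySem.Dict.get?_insert, PySem.Dict.get?_empty,
          h4, h5, h6, h7, h8, h9, h10]
  rw [hg]
  unfold pyFilterChain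
  rw [if_neg h4, if_neg h5, if_neg h6, if_neg h7, if_neg h8, if_neg h9, if_neg h10]

lemma GoodC_insert {c : PySem.Dict (List Int × Int) (List Int)} (hc : GoodC c)
    {nums : List Int} {n : Int} {res : List Int} (hres : res = generate nums n) :
    GoodC (c.insert (nums, n) res) := by
  intro k v hget
  rw [PySem.Dict.get?_insert] at hget
  by_cases hk : k = (nums, n)
  · rw [if_pos hk] at hget
    cases hget
    rw [hk, hres]
  · rw [if_neg hk] at hget
    exact hc k v hget

lemma GoodC_empty : GoodC PySem.Dict.empty := by
  intro k v hget
  rw [PySem.Dict.get?_empty] at hget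
  cases hget

lemma goB_loop (fuel : Nat) (nums : List Int) (n : Int)
    (Hrec : ∀ (rest : List Int) (m : Int) (c : PySem.Dict (List Int × Int) (List Int)),
      rest.length < fuel → GoodC c →
      (goB fuel rest m c).1 = generate rest m ∧ GoodC (goB fuel rest m c).2)
    (hf : nums.length ≤ fuel) :
    ∀ (is : List Int), (∀ i ∈ is, 0 ≤ i ∧ i < (nums.length : Int)) →
    ∀ (l : List Int) (c : PySem.Dict (List Int × Int) (List Int)), GoodC c →
    (is.foldl (fun acc i =>
        (acc.1 ++ (goB fuel (PySem.List.slice nums none (some i) ++ PySem.List.slice nums (some (i+1)) none) (n-1) acc.2).1.map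
            (fun g => PySem.List.pyGetD nums i 0 + 10*g),
         (goB fuel (PySem.List.slice nums none (some i) ++ PySem.List.slice nums (some (i+1)) none) (n-1) acc.2).2)) (l, c)).1
      = is.foldl (fun l i => l ++ (generate (remAt nums i) (n-1)).map
          (fun g => PySem.List.pyGetD nums i 0 + 10*g)) l
    ∧ GoodC (is.foldl (fun acc i =>
        (acc.1 ++ (goB fuel (PySem.List.slice nums none (some i) ++ PySem.List.slice nums (some (i+1)) none) (n-1) acc.2).1.map
            (fun g => PySem.List.pyGetD nums i 0 + 10*g),
         (goB fuel (PySem.List.slice nums none (some i) ++ PySem.List.slice nums (some (i+1)) none) (n-1) acc.2).2)) (l, c)).2 := by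
  intro is
  induction is with
  | nil => intro _ l c hc; exact ⟨rfl, hc⟩
  | cons i is IH =>
    intro hb l c hc
    obtain ⟨hi0, hilt⟩ := hb i (List.mem_cons_self)
    have hrem : (remAt nums i).length = nums.length - 1 := remAt_length nums i hi0 hilt
    have hlen : (remAt nums i).length < fuel := by omega
    obtain ⟨e1, g1⟩ := Hrec (remAt nums i) (n-1) c hlen hc
    simp only [List.foldl_cons]
    rw [show (PySem.List.slice nums none (some i) ++ PySem.List.slice nums (some (i+1)) none)
          = remAt nums i from rfl]
    rw [e1]
    exact IH (fun j hj => hb j (List.mem_cons_of_mem i hj))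
      (l ++ (generate (remAt nums i) (n-1)).map (fun g => PySem.List.pyGetD nums i 0 + 10*g))
      (goB fuel (remAt nums i) (n-1) c).2 g1

lemma goB_correct : ∀ (fuel : Nat) (nums : List Int) (n : Int)
    (c : PySem.Dict (List Int × Int) (List Int)), nums.length < fuel → GoodC c →
    (goB fuel nums n c).1 = generate nums n ∧ GoodC (goB fuel nums n c).2 := by
  intro fuel
  induction fuel with
  | zero => intro nums n c h _; exact absurd h (by omega)
  | succ fuel IH =>
    intro nums n c hlen hc
    cases hget : c.get? (nums, n) with
    | some v =>
      simp only [goB, hget]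
      exact ⟨hc (nums, n) v hget, hc⟩
    | none =>
      simp only [goB, hget]
      by_cases hn : n = 1
      · subst hn
        rw [if_pos rfl]
        cases nums with
        | nil =>
          have hres : ([] : List Int) = generate [] 1 := by
            rw [generate_unfold]; simp
          exact ⟨hres, GoodC_insert hc hres⟩
        | cons x t =>
          have hres : (if x ≠ 0 then x :: t else []) = generate (x :: t) 1 := by
            rw [generate_unfold]; simp
          exact ⟨hres, GoodC_insert hc hres⟩
      · rw [if_neg hn]
        have hloop := goB_loop fuel nums n IH (by omega)
          (PySem.List.pyRange 0 (PySem.List.len nums) 1)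
          (fun i hi => by
            obtain ⟨hi0, hilt⟩ := PySem.List.mem_pyRange_one.mp hi
            rw [PySem.List.len_eq] at hilt
            exact ⟨hi0, hilt⟩)
          [] c hc
        obtain ⟨hp1, hp2⟩ := hloop
        have hres : (match (PySem.Dict.ofList [((4:Int),(2:Int)),(5,3),(6,5),(7,7),(8,11),(9,13),(10,17)]).get? n with
            | none => ((PySem.List.pyRange 0 (PySem.List.len nums) 1).foldl (fun acc i =>
                (acc.1 ++ (goB fuel (PySem.List.slice nums none (some i) ++ PySem.List.slice nums (some (i+1)) none) (n-1) acc.2).1.map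
                    (fun g => PySem.List.pyGetD nums i 0 + 10*g),
                 (goB fuel (PySem.List.slice nums none (some i) ++ PySem.List.slice nums (some (i+1)) none) (n-1) acc.2).2)) ([], c)).1
            | some d => ((PySem.List.pyRange 0 (PySem.List.len nums) 1).foldl (fun acc i =>
                (acc.1 ++ (goB fuel (PySem.List.slice nums none (some i) ++ PySem.List.slice nums (some (i+1)) none) (n-1) acc.2).1.map
                    (fun g => PySem.List.pyGetD nums i 0 + 10*g),
                 (goB fuel (PySem.List.slice nums none (some i) ++ PySem.List.slice nums (some (i+1)) none) (n-1) acc.2).2)) ([], c)).1.filter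
                  (fun x => PySem.Int.mod (PySem.Int.mod x 1000) d == 0))
            = generate nums n := by
          rw [hp1, table_filter_eq, generate_unfold, if_neg hn]
        constructor
        · exact hres
        · exact GoodC_insert hp2 hres

-- ===== VERDICT (by name: the statement is the Claim_ definition above) =====
theorem generate_spec : Claim_equal_generate := by
  intro nums n _ _
  unfold Spec_generate generate_alt
  exact (goB_correct (nums.length + 1) nums n PySem.Dict.empty (by omega) GoodC_empty).1.symm
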